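-- pv_equiv track=rewrite | github.com/yrapop01/fable | fable/tex.py | comments
-- ===== SOURCE A (Python) =====
-- def comments(s):
--     comment = False
--     for c in s:
--         if c == '%':
--             comment = True
--         if not comment:
--             yield c
--         if c == '\n':
--             comment = False
-- ===== SOURCE B (Python) =====
-- def comments(s):
--     yield from _emit(s.split('\n'))
--
-- def _emit(parts):
--     line, rest = parts[0], parts[1:]
--     if '%' in line:
--         yield from line[:line.find('%')]
--         if rest:
--             yield from _emit(rest)
--     else:
--         yield from line
--         if rest:
--             yield '\n'
--             yield from _emit(rest)
-- ===== Notes on version B (the rewrite author's own statement) =====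
-- stated objective: alternative
-- what changed: Replaced the char-by-char boolean state machine with a split-on-newlines pass that, per line, yields the prefix before the first percent sign (keeping the line-ending newline only for uncommented lines).
import Mathlib
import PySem

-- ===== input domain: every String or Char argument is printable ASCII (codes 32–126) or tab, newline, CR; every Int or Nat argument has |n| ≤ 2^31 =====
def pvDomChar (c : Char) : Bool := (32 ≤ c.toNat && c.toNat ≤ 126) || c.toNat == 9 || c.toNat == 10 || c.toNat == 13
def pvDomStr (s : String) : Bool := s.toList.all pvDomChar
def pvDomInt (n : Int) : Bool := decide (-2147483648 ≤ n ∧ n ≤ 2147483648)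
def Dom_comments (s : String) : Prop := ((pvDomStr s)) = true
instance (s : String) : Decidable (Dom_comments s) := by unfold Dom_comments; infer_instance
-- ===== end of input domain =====

-- B replaces A's char-by-char comment-state machine with a split-on-newlines pass
-- that keeps, per line, the prefix before the first percent sign (alternative decomposition).
-- A is a generator of 1-character strings; both ports return the list of yielded chars.

-- ===== PORT A =====
-- the loop body of A, step for step: set comment on '%', yield if not comment, reset on '\n'
def commentsGo : List Char → Bool → List String
  | [], _ => []
  | c :: rest, comment =>
    let comment := if c = '%' then true else comment
    (if comment = false then [String.ofList [c]] else []) ++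
      commentsGo rest (if c = '\n' then false else comment)

def comments (s : String) : List String := commentsGo s.toList false

-- ===== PORT B =====
-- _emit from Source B: structural recursion over the list of lines
def emitAlt : List String → List String
  | [] => []
  | line :: rest =>
    if PySem.Str.isIn "%" line then
      (PySem.Str.slice line none (some (PySem.Str.find line "%"))).toList.map
          (fun c => String.ofList [c]) ++
        (if rest = [] then [] else emitAlt rest)
    else
      line.toList.map (fun c => String.ofList [c]) ++
        (if rest = [] then [] else String.ofList ['\n'] :: emitAlt rest)

def comments_alt (s : String) : List String :=
  emitAlt ((PySem.Str.split? s "\n").getD [])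

-- ===== PRECONDITION & SPEC =====
def Spec_comments (s : String) (out : List String) : Prop := out = comments_alt s
instance (s : String) (out : List String) : Decidable (Spec_comments s out) := by unfold Spec_comments; infer_instance

-- ===== CLAIM (what is proved, stated in full; the proofs are below) =====
def Claim_equal_comments : Prop := ∀ (s : String), Dom_comments s → Spec_comments s (comments s)

-- ===== LEMMAS AND PROOFS =====

-- simple structural split on '\n'
def splitNl : List Char → List (List Char)
  | [] => [[]]
  | c :: rest =>
    if c = '\n' then [] :: splitNl rest
    else
      match splitNl rest with
      | [] => [[c]]
      | h :: t => (c :: h) :: t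

-- char-level counterpart of emitAlt
def gLines : List (List Char) → List String
  | [] => []
  | line :: rest =>
    if '%' ∈ line then
      (line.takeWhile (· ≠ '%')).map (fun c => String.ofList [c]) ++
        (if rest = [] then [] else gLines rest)
    else
      line.map (fun c => String.ofList [c]) ++
        (if rest = [] then [] else String.ofList ['\n'] :: gLines rest)

theorem splitNl_ne_nil (l : List Char) : splitNl l ≠ [] := by
  cases l with
  | nil => simp [splitNl]
  | cons c rest =>
    simp only [splitNl]
    split
    · simp
    · split <;> simp

theorem splitOn_go_eq (l : List Char) : ∀ (fuel : Nat) (cur : List Char)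
    (acc : List (List Char)), l.length < fuel →
    PySem.Chars.splitOn.go ['\n'] fuel l cur acc =
      acc.reverse ++
        (match splitNl l with
         | [] => []
         | h :: t => (cur.reverse ++ h) :: t) := by
  induction l with
  | nil =>
    intro fuel cur acc h
    cases fuel with
    | zero => omega
    | succ f => simp [PySem.Chars.splitOn.go, splitNl]
  | cons c rest ih =>
    intro fuel cur acc h
    cases fuel with
    | zero => omega
    | succ f =>
      rw [PySem.Chars.splitOn.go]
      by_cases hc : c = '\n'
      · subst hc
        have hpre : ['\n'].isPrefixOf ('\n' :: rest) = true := by simp [List.isPrefixOf]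
        simp only [hpre, if_pos]
        rw [show List.drop ['\n'].length ('\n' :: rest) = rest from rfl]
        rw [ih f [] (cur.reverse :: acc) (by simpa using h)]
        rcases hne : splitNl rest with _ | ⟨h', t'⟩
        · exact absurd hne (splitNl_ne_nil rest)
        · simp [splitNl, hne]
      · have hpre : ['\n'].isPrefixOf (c :: rest) = false := by
          simp [List.isPrefixOf]; intro hh; exact absurd hh.symm hc
        simp only [hpre]
        rw [if_neg (by simp)]
        rw [ih f (c :: cur) acc (by simpa using h)]
        rcases hne : splitNl rest with _ | ⟨h', t'⟩
        · exact absurd hne (splitNl_ne_nil rest)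
        · simp [splitNl, hne, hc]

theorem splitOn_eq_splitNl (l : List Char) :
    PySem.Chars.splitOn l ['\n'] = splitNl l := by
  rw [PySem.Chars.splitOn, splitOn_go_eq l (l.length + 1) [] [] (by omega)]
  rcases hne : splitNl l with _ | ⟨h', t'⟩
  · exact absurd hne (splitNl_ne_nil l)
  · simp

-- find on a single-char needle
theorem find_go_pct (l : List Char) : ∀ (k : Nat),
    PySem.Chars.find.go ['%'] l k =
      if '%' ∈ l then (k : Int) + (l.takeWhile (· ≠ '%')).length else -1 := by
  induction l with
  | nil => intro k; simp [PySem.Chars.find.go]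
  | cons c rest ih =>
    intro k
    rw [PySem.Chars.find.go]
    by_cases hc : c = '%'
    · subst hc
      simp [List.isPrefixOf, List.takeWhile]
    · have hpre : ['%'].isPrefixOf (c :: rest) = false := by
        simp [List.isPrefixOf]; intro hh; exact absurd hh.symm hc
      simp only [hpre]
      rw [if_neg (by simp)]
      rw [ih (k + 1)]
      by_cases hm : '%' ∈ rest
      · simp [hm, hc, List.takeWhile]
        omega
      · have hnm : '%' ∉ c :: rest := by
          intro hmem
          rcases List.mem_cons.mp hmem with hh | hh
          · exact hc hh.symm
          · exact hm hh
        simp [hm, hnm]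

theorem find_pct (l : List Char) :
    PySem.Chars.find l ['%'] =
      if '%' ∈ l then ((l.takeWhile (· ≠ '%')).length : Int) else -1 := by
  rw [PySem.Chars.find, find_go_pct]
  split <;> simp

theorem isIn_pct (l : List Char) :
    PySem.Chars.isIn ['%'] l = decide ('%' ∈ l) := by
  rw [PySem.Chars.isIn, find_pct]
  by_cases hm : '%' ∈ l <;> simp [hm]

-- emitAlt over ofList'd lines computes gLines
theorem emitAlt_eq_gLines (ps : List (List Char)) :
    emitAlt (ps.map String.ofList) = gLines ps := by
  induction ps with
  | nil => simp [emitAlt, gLines]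
  | cons line rest ih =>
    rw [List.map_cons, emitAlt, gLines]
    have hIn : PySem.Str.isIn "%" (String.ofList line) = decide ('%' ∈ line) := by
      rw [PySem.Str.isIn]
      simpa using isIn_pct line
    have hFind : PySem.Str.find (String.ofList line) "%" =
        if '%' ∈ line then ((line.takeWhile (· ≠ '%')).length : Int) else -1 := by
      rw [PySem.Str.find]
      simpa using find_pct line
    by_cases hm : '%' ∈ line
    · rw [if_pos (by rw [hIn]; simp [hm]), if_pos hm]
      have hslice : (PySem.Str.slice (String.ofList line) none
          (some (PySem.Str.find (String.ofList line) "%"))).toList =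
          line.takeWhile (· ≠ '%') := by
        rw [PySem.Str.toList_slice, String.toList_ofList, hFind, if_pos hm]
        simp only [PySem.Chars.slice]
        rw [PySem.List.slice_to _ (by positivity)]
        simp only [Int.toNat_natCast]
        exact (List.prefix_iff_eq_take.mp (List.takeWhile_prefix _)).symm
      rw [hslice]
      by_cases hr : rest = []
      · simp [hr]
      · rw [if_neg (by simpa using hr), if_neg hr, ih]
    · rw [if_neg (by rw [hIn]; simp [hm]), if_neg hm]
      rw [String.toList_ofList]
      by_cases hr : rest = []
      · simp [hr]
      · rw [if_neg (by simpa using hr), if_neg hr, ih]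

-- A in comment state skips up to and including the next newline
theorem commentsGo_true (l : List Char) :
    commentsGo l true = commentsGo ((l.dropWhile (· ≠ '\n')).drop 1) false := by
  induction l with
  | nil => simp [commentsGo]
  | cons c rest ih =>
    by_cases hc : c = '\n'
    · subst hc; simp [commentsGo, List.dropWhile]
    · simp [commentsGo, List.dropWhile, hc, ih]

-- splitting after the first newline
theorem splitNl_no_nl (l : List Char) (h : '\n' ∉ l) : splitNl l = [l] := by
  induction l with
  | nil => simp [splitNl]
  | cons c rest ih =>
    simp only [List.mem_cons, not_or] at h
    rw [splitNl, if_neg (fun hh => h.1 hh.symm), ih h.2]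

theorem splitNl_with_nl (l : List Char) (h : '\n' ∈ l) :
    splitNl l = (l.takeWhile (· ≠ '\n')) :: splitNl ((l.dropWhile (· ≠ '\n')).drop 1) := by
  induction l with
  | nil => simp at h
  | cons c rest ih =>
    by_cases hc : c = '\n'
    · subst hc; simp [splitNl, List.takeWhile, List.dropWhile]
    · have hm : '\n' ∈ rest := by
        rcases List.mem_cons.mp h with hh | hh
        · exact absurd hh.symm hc
        · exact hh
      rw [splitNl, if_neg hc, ih hm]
      simp [hc]

-- main char-level equivalence, by strong induction on length (the '%' case
-- recurses on the suffix after the first newline)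
theorem commentsGo_eq_gLines_bounded (n : Nat) : ∀ (l : List Char), l.length ≤ n →
    commentsGo l false = gLines (splitNl l) := by
  induction n with
  | zero =>
    intro l hl
    have : l = [] := List.eq_nil_of_length_eq_zero (by omega)
    subst this
    simp [commentsGo, splitNl, gLines]
  | succ n ih =>
    intro l hl
    cases l with
    | nil => simp [commentsGo, splitNl, gLines]
    | cons c rest =>
      have hrest : rest.length ≤ n := by simpa using hl
      by_cases hnl : c = '\n'
      · subst hnl
        have hA : commentsGo ('\n' :: rest) false =
            String.ofList ['\n'] :: commentsGo rest false := by
          simp [commentsGo]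
        rw [hA, ih rest hrest, splitNl, if_pos rfl, gLines]
        rw [if_neg (by simp : ¬ ('%' ∈ ([] : List Char)))]
        simp [splitNl_ne_nil rest]
      · by_cases hp : c = '%'
        · subst hp
          have hA : commentsGo ('%' :: rest) false = commentsGo rest true := by
            simp [commentsGo]
          rw [hA, commentsGo_true, splitNl, if_neg (by decide)]
          rcases hne : splitNl rest with _ | ⟨h', t'⟩
          · exact absurd hne (splitNl_ne_nil rest)
          · rw [gLines, if_pos (by simp)]
            rw [List.takeWhile_cons, if_neg (by simp)]
            by_cases hm : '\n' ∈ rest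
            · rw [splitNl_with_nl rest hm] at hne
              have ht : t' = splitNl ((rest.dropWhile (· ≠ '\n')).drop 1) := by
                injection hne with h1 h2; exact h2.symm
              have hlen : ((rest.dropWhile (· ≠ '\n')).drop 1).length ≤ n := by
                have := List.length_dropWhile_le (p := fun x => decide (x ≠ '\n')) (l := rest)
                simp only [List.length_drop]
                omega
              rw [ih _ hlen, ← ht]
              have htne : t' ≠ [] := ht ▸ splitNl_ne_nil _
              simp [htne]
            · rw [splitNl_no_nl rest hm] at hne
              injection hne with h1 h2
              subst h2
              have hdw : rest.dropWhile (· ≠ '\n') = [] := by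
                rw [List.dropWhile_eq_nil_iff]
                intro x hx
                have hxn : x ≠ '\n' := fun hxx => hm (hxx ▸ hx)
                simp [hxn]
              rw [hdw]
              simp [commentsGo]
        · have hA : commentsGo (c :: rest) false =
              String.ofList [c] :: commentsGo rest false := by
            simp [commentsGo, hp, hnl]
          have ihr := ih rest hrest
          rw [hA, ihr, splitNl, if_neg hnl]
          rcases hne : splitNl rest with _ | ⟨h', t'⟩
          · exact absurd hne (splitNl_ne_nil rest)
          · rw [gLines, gLines]
            by_cases hm : '%' ∈ h'
            · rw [if_pos hm, if_pos (List.mem_cons.mpr (Or.inr hm))]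
              simp [hp]
            · have hcm : ¬ '%' ∈ c :: h' := by
                intro hh
                rcases List.mem_cons.mp hh with h1 | h1
                · exact hp h1.symm
                · exact hm h1
              rw [if_neg hm, if_neg hcm]
              simp

theorem commentsGo_eq_gLines (l : List Char) :
    commentsGo l false = gLines (splitNl l) :=
  commentsGo_eq_gLines_bounded l.length l le_rfl

-- ===== VERDICT (by name: the statement is the Claim_ definition above) =====
theorem comments_spec : Claim_equal_comments := by
  intro s _
  unfold Spec_comments comments comments_alt
  rw [PySem.Str.split?, PySem.Chars.split?]
  rw [if_neg (by decide)]
  simp only [Option.map_some, Option.getD_some]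
  rw [show ("\n".toList) = ['\n'] from rfl]
  rw [splitOn_eq_splitNl, emitAlt_eq_gLines, commentsGo_eq_gLines]
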